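-- pv_equiv track=rewrite | github.com/AlexeyPevz/MAS | tools/fact_checker.py | cross_reference
-- ===== SOURCE A (Python) =====
-- from typing import List, Dict, Any
--
-- def cross_reference(snippets: List[str]) -> bool:
--     """Проверить совпадения фраз в нескольких источниках."""
--
--     seen = set()
--     for text in snippets:
--         key = text.strip().lower()[:50]
--         if key in seen:
--             return True
--         seen.add(key)
--     return False
-- ===== SOURCE B (Python) =====
-- def cross_reference(snippets):
--     """Проверить совпадения фраз в нескольких источниках."""
--     keys = [text.strip().lower()[:50] for text in snippets]
--     return len(keys) != len(set(keys))
-- ===== Notes on version B (the rewrite author's own statement) =====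
-- stated objective: idiomatic
-- what changed: Replaces the guarded loop with an incremental seen-set and early return by a comprehension materializing all normalized keys followed by a single cardinality comparison len(keys) != len(set(keys)).
import Mathlib
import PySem

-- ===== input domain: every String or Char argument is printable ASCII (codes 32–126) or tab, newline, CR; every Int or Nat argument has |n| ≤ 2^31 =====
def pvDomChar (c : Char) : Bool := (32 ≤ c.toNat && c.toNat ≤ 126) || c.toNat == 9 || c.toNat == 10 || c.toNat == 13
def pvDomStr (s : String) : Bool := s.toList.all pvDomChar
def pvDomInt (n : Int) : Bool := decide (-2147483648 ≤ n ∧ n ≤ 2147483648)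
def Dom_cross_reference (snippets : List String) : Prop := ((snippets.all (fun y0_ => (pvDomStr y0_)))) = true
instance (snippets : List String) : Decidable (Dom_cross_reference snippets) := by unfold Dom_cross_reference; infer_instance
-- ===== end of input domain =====

-- B replaces A's incremental seen-set loop with early return by a map of all keys plus one cardinality comparison (idiomatic; same cost).

-- ===== PORT A =====
-- key = text.strip().lower()[:50]  (shared normalization expression of both Pythons)
def pvKey (text : String) : String :=
  PySem.Str.slice (PySem.Str.lower (PySem.Str.strip text)) none (some 50)

-- the 'for text in snippets' loop with accumulator 'seen' and early return
def pvGoA (seen : PySem.Set String) : List String → Bool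
  | [] => false
  | text :: rest =>
    let key := pvKey text
    if PySem.Set.contains seen key then true
    else pvGoA (PySem.Set.add seen key) rest

def cross_reference (snippets : List String) : Bool :=
  pvGoA PySem.Set.empty snippets

-- ===== PORT B =====
def cross_reference_alt (snippets : List String) : Bool :=
  let keys := snippets.map (fun text => pvKey text)
  decide (keys.length ≠ (PySem.Set.ofList keys).length)

-- ===== PRECONDITION & SPEC =====
def Spec_cross_reference (snippets : List String) (out : Bool) : Prop := out = cross_reference_alt snippets
instance (snippets : List String) (out : Bool) : Decidable (Spec_cross_reference snippets out) := by unfold Spec_cross_reference; infer_instance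

-- ===== CLAIM (what is proved, stated in full; the proofs are below) =====
def Claim_equal_cross_reference : Prop := ∀ (snippets : List String), Dom_cross_reference snippets → Spec_cross_reference snippets (cross_reference snippets)

-- ===== LEMMAS AND PROOFS =====

theorem pvGoA_char (ts : List String) : ∀ (s : List String), s.Nodup →
    pvGoA s ts = decide (¬ (s ++ ts.map pvKey).Nodup) := by
  induction ts with
  | nil =>
    intro s hs
    simp [pvGoA, hs]
  | cons t ts ih =>
    intro s hs
    by_cases hmem : pvKey t ∈ s
    · have hc : PySem.Set.contains s (pvKey t) = true :=
        (PySem.Set.contains_iff s (pvKey t)).mpr hmem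
      have hnot : ¬ (s ++ (t :: ts).map pvKey).Nodup := by
        intro h
        rcases (List.nodup_append.mp h) with ⟨_, _, hdisj⟩
        exact hdisj _ hmem _ (by simp) rfl
      simp only [pvGoA, hc, if_true, hnot, decide_not]
      simp
    · have hc : PySem.Set.contains s (pvKey t) = false := by
        cases hb : PySem.Set.contains s (pvKey t) with
        | false => rfl
        | true => exact absurd ((PySem.Set.contains_iff s (pvKey t)).mp hb) hmem
      have hadd : PySem.Set.add s (pvKey t) = s ++ [pvKey t] :=
        PySem.Set.add_of_not_mem hmem
      have hsn : (s ++ [pvKey t]).Nodup := by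
        rw [List.nodup_append]
        refine ⟨hs, List.nodup_singleton _, ?_⟩
        intro a ha b hb
        simp at hb
        subst hb
        intro he; subst he; exact hmem ha
      have hih := ih (s ++ [pvKey t]) hsn
      have hass : (s ++ [pvKey t]) ++ ts.map pvKey = s ++ (t :: ts).map pvKey := by simp
      rw [hass] at hih
      simp only [pvGoA, hc, Bool.false_eq_true, if_false, hadd, hih]

theorem pvAdd_len_le (s : List String) (x : String) :
    (PySem.Set.add s x).length ≤ s.length + 1 := by
  rw [PySem.Set.add_eq_ite]
  split_ifs <;> simp

theorem pvUpdate_len_le (xs : List String) : ∀ (s : List String),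
    (PySem.Set.update s xs).length ≤ s.length + xs.length := by
  induction xs with
  | nil => intro s; simp [PySem.Set.update]
  | cons x xs ih =>
    intro s
    rw [PySem.Set.update_cons]
    have h1 := ih (PySem.Set.add s x)
    have h2 := pvAdd_len_le s x
    simp only [List.length_cons]
    omega

theorem pvUpdate_len_iff (xs : List String) : ∀ (s : List String), s.Nodup →
    ((PySem.Set.update s xs).length = s.length + xs.length ↔ (s ++ xs).Nodup) := by
  induction xs with
  | nil => intro s hs; simp [PySem.Set.update, hs]
  | cons x xs ih =>
    intro s hs
    rw [PySem.Set.update_cons]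
    by_cases hmem : x ∈ s
    · have hc : PySem.Set.add s x = s := PySem.Set.add_of_mem hmem
      have hub := pvUpdate_len_le xs s
      rw [hc]
      constructor
      · intro h
        simp only [List.length_cons] at h
        omega
      · intro h
        rcases (List.nodup_append.mp h) with ⟨_, _, hdisj⟩
        exact absurd rfl (hdisj _ hmem _ (by simp))
    · have hc : PySem.Set.add s x = s ++ [x] := PySem.Set.add_of_not_mem hmem
      have hsn : (s ++ [x]).Nodup := by
        rw [List.nodup_append]
        refine ⟨hs, List.nodup_singleton _, ?_⟩
        intro a ha b hb
        simp at hb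
        subst hb
        intro he; subst he; exact hmem ha
      have h1 := ih (s ++ [x]) hsn
      have hass : (s ++ [x]) ++ xs = s ++ (x :: xs) := by simp
      rw [hass] at h1
      rw [hc]
      constructor
      · intro h
        apply h1.mp
        simp only [List.length_append, List.length_cons, List.length_nil] at h ⊢
        omega
      · intro h
        have := h1.mpr h
        simp only [List.length_append, List.length_cons, List.length_nil] at this ⊢
        omega

-- ===== VERDICT (by name: the statement is the Claim_ definition above) =====
theorem cross_reference_spec : Claim_equal_cross_reference := by
  intro snippets _
  unfold Spec_cross_reference cross_reference cross_reference_alt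
  have hA := pvGoA_char snippets [] (List.nodup_nil)
  simp only [List.nil_append] at hA
  have hempty : (PySem.Set.empty : PySem.Set String) = [] := rfl
  rw [hempty, hA]
  have hB := pvUpdate_len_iff (snippets.map pvKey) [] (List.nodup_nil)
  simp only [List.length_nil, List.nil_append, Nat.zero_add] at hB
  have hofl : PySem.Set.ofList (snippets.map pvKey) = PySem.Set.update [] (snippets.map pvKey) := rfl
  show _ = decide ((snippets.map (fun t => pvKey t)).length ≠ (PySem.Set.ofList (snippets.map (fun t => pvKey t))).length)
  have hmap : snippets.map (fun t => pvKey t) = snippets.map pvKey := rfl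
  rw [hmap, hofl]
  by_cases h : (snippets.map pvKey).Nodup
  · have := hB.mpr h
    simp [h, this]
  · have hne : (PySem.Set.update [] (snippets.map pvKey)).length ≠ (snippets.map pvKey).length := by
      intro he; exact h (hB.mp he)
    have hne' : (snippets.map pvKey).length ≠ (PySem.Set.update [] (snippets.map pvKey)).length :=
      fun he => hne he.symm
    simp only [h, decide_not, ne_eq]
    simpa using hne'
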